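-- pv_equiv track=rewrite | github.com/iraykhel/qart | qart_driver.py | address_split
-- ===== SOURCE A (Python) =====
-- def address_split(address,split_size=4):
--     hex = address[2:].lower()
--     splits = []
--     rect = []
--     for idx, char in enumerate(hex):
--         val = int(char, 16)
--         if idx % split_size == 0:
--             splits.append(rect)
--             rect = []
--         rect.append(val)
--     splits.append(rect)
--     splits = splits[1:]
--     return splits
-- ===== SOURCE B (Python) =====
-- def address_split(address, split_size=4):
--     hex = address[2:].lower()
--     return [[int(c, 16) for c in hex[i:i + split_size]]
--             for i in range(0, len(hex), split_size)]
-- ===== Notes on version B (the rewrite author's own statement) =====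
-- stated objective: idiomatic
-- what changed: B replaces A's single flat pass with modulo boundary detection and the prime-empty-chunk-then-slice-off trick by a nested comprehension over chunk start indices range(0, len(hex), split_size) with slicing hex[i:i+split_size].
-- outside the precondition, e.g. on address_split('0x12345', -4): A returns [[1, 2, 3, 4], [5]], B returns []; on address_split('', 0): A returns [], B raises ValueError
import Mathlib
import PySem

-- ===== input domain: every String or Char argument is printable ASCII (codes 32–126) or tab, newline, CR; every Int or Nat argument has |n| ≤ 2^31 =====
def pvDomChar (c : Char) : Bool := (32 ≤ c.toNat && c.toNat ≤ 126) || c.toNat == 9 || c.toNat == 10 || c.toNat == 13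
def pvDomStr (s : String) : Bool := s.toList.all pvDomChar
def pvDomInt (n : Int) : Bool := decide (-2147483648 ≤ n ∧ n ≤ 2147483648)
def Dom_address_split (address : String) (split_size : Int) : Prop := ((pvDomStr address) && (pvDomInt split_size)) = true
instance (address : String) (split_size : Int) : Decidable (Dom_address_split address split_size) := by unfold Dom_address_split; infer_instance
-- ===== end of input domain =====

-- B rebuilds the chunking as a nested comprehension over chunk start indices with slicing,
-- instead of A's flat single pass with modulo boundary detection (objective: idiomatic; return values only, no mutation).

-- ===== PORT A =====
-- int(c, 16) for a single char; Pre_ restricts to hex digits, where ofCharsBase? is some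
def pvHexVal (c : Char) : Int := (PySem.Int.ofCharsBase? [c] 16).getD 0

-- one iteration of A's for-loop: maybe flush rect into splits, then append val to rect
def pvStepA (split_size : Int) (st : List (List Int) × List Int) (p : Int × Char) :
    List (List Int) × List Int :=
  let val := pvHexVal p.2
  let st' := if PySem.Int.mod p.1 split_size == 0 then (st.1 ++ [st.2], ([] : List Int)) else st
  (st'.1, st'.2 ++ [val])

def address_split (address : String) (split_size : Int) : List (List Int) :=
  let hex := PySem.Chars.lower (PySem.List.slice address.toList (some 2) none)
  let st := (PySem.List.enumerate hex).foldl (pvStepA split_size) ([], [])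
  PySem.List.slice (st.1 ++ [st.2]) (some 1) none

-- ===== PORT B =====
def address_split_alt (address : String) (split_size : Int) : List (List Int) :=
  let hex := PySem.Chars.lower (PySem.List.slice address.toList (some 2) none)
  (PySem.List.pyRange 0 (hex.length : Int) split_size).map
    (fun i => (PySem.List.slice hex (some i) (some (i + split_size))).map pvHexVal)

-- ===== PRECONDITION & SPEC =====
-- Pre_ restricts to the natural domain: chars after the 2-char prefix must be hex digits (otherwise
-- int(c, 16) raises ValueError in both) and split_size ≥ 1, except that split_size < 0 with empty hex
-- is kept (both return []). Excluded while A still returns: negative split_size with nonempty hex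
-- (A accidentally chunks by |split_size|, B returns [] — both accidental values of a nonsense input)
-- and split_size = 0 with empty hex (A accidentally returns [] before reaching the modulo, B's range
-- raises ValueError).
def pvIsHexDigit (c : Char) : Bool :=
  ('0' ≤ c && c ≤ '9') || ('a' ≤ c && c ≤ 'f') || ('A' ≤ c && c ≤ 'F')

def Pre_address_split (address : String) (split_size : Int) : Prop :=
  (1 ≤ split_size ∨ (split_size < 0 ∧ address.toList.drop 2 = [])) ∧
    (address.toList.drop 2).all pvIsHexDigit = true
instance (address : String) (split_size : Int) : Decidable (Pre_address_split address split_size) := by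
  unfold Pre_address_split; infer_instance

def pvWitness_address_split : String × Int := ("0x12345", 4)

def Spec_address_split (address : String) (split_size : Int) (out : List (List Int)) : Prop :=
  out = address_split_alt address split_size
instance (address : String) (split_size : Int) (out : List (List Int)) : Decidable (Spec_address_split address split_size out) := by
  unfold Spec_address_split; infer_instance

-- ===== CLAIM (what is proved, stated in full; the proofs are below) =====
def Claim_equal_address_split : Prop := ∀ (address : String) (split_size : Int), Dom_address_split address split_size → Pre_address_split address split_size → Spec_address_split address split_size (address_split address split_size)

-- ===== LEMMAS AND PROOFS =====

theorem pvRange_cons (a b : Int) {s : Int} (hs : 0 < s) (hab : a < b) :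
    PySem.List.pyRange a b s = a :: PySem.List.pyRange (a + s) b s := by
  rw [PySem.List.pyRange_of_pos _ _ hs, PySem.List.pyRange_of_pos _ _ hs]
  have hcount : (if a < b then ((b - a + s - 1) / s).toNat else 0)
      = (if a + s < b then ((b - (a + s) + s - 1) / s).toNat else 0) + 1 := by
    rw [if_pos hab]
    by_cases h : a + s < b
    · rw [if_pos h]
      have h1 : (b - a + s - 1) = (b - (a + s) + s - 1) + 1 * s := by ring
      rw [h1, Int.add_mul_ediv_right _ _ (by omega : s ≠ 0)]
      have h2 : 0 ≤ (b - (a + s) + s - 1) / s := Int.ediv_nonneg (by omega) (by omega)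
      omega
    · rw [if_neg h]
      have : (b - a + s - 1) / s = 1 := by
        rw [← PySem.Int.floordiv_eq_ediv_of_pos hs]
        rw [PySem.Int.floordiv_eq_iff_of_pos hs]
        constructor <;> omega
      omega
  rw [hcount, List.range_succ_eq_map]
  simp only [List.map_cons, List.map_map]
  refine List.cons_eq_cons.mpr ⟨by simp, ?_⟩
  apply List.map_congr_left
  intro k _
  simp [Nat.succ_eq_add_one]

  ring

theorem pvRange_shift (b : Int) {s : Int} (hs : 0 < s) :
    PySem.List.pyRange s b s = (PySem.List.pyRange 0 (b - s) s).map (· + s) := by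
  rw [PySem.List.pyRange_of_pos _ _ hs, PySem.List.pyRange_of_pos _ _ hs]
  have hcount : (if s < b then ((b - s + s - 1) / s).toNat else 0)
      = (if 0 < b - s then ((b - s - 0 + s - 1) / s).toNat else 0) := by
    have h1 : b - s + s - 1 = b - s - 0 + s - 1 := by ring
    have h2 : (s < b) ↔ (0 < b - s) := by omega
    simp only [h1, h2]
  rw [hcount, List.map_map]
  apply List.map_congr_left
  intro k _
  simp
  ring

def pvChunks {α : Type} (n : Nat) : List α → List (List α)
  | [] => []
  | c :: t => ((c :: t).take (n + 1)) :: pvChunks n ((c :: t).drop (n + 1))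
termination_by l => l.length
decreasing_by simp

theorem pvB_chunks_aux {s : Int} (hs : 0 < s) (n : Nat) :
    ∀ (l : List Char), l.length ≤ n →
    (PySem.List.pyRange 0 (l.length : Int) s).map
      (fun i => PySem.List.slice l (some i) (some (i + s)))
    = pvChunks (s.toNat - 1) l := by
  induction n with
  | zero =>
    intro l hl
    have : l = [] := List.eq_nil_of_length_eq_zero (by omega)
    subst this
    simp [pvChunks, PySem.List.pyRange_of_pos _ _ hs]
  | succ n ih =>
    intro l hl
    match l with
    | [] => simp [pvChunks, PySem.List.pyRange_of_pos _ _ hs]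
    | c :: t =>
      have hsN : 1 ≤ s.toNat := by omega
      have hlen : (0:Int) < ((c :: t).length : Int) := by simp
      rw [pvRange_cons _ _ hs hlen, List.map_cons]
      have hhead : PySem.List.slice (c :: t) (some 0) (some (0 + s))
          = (c :: t).take s.toNat := by
        rw [PySem.List.slice_toNat _ (le_refl 0) (by omega)]
        simp
      conv_rhs => rw [pvChunks]
      rw [show s.toNat - 1 + 1 = s.toNat from by omega]
      rw [show (0:Int) + s = s from by ring] at *
      refine List.cons_eq_cons.mpr ⟨hhead, ?_⟩
      rw [pvRange_shift _ hs, List.map_map]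
      by_cases hle : s.toNat ≤ (c :: t).length
      · have hdlen : (((c :: t).drop s.toNat).length : Int) = ((c :: t).length : Int) - s := by
          have h1 : ((c :: t).drop s.toNat).length = (c :: t).length - s.toNat := List.length_drop
          have h2 : (c :: t).length = t.length + 1 := rfl
          omega
        rw [← ih ((c :: t).drop s.toNat) (by
          have h1 : ((c :: t).drop s.toNat).length = (c :: t).length - s.toNat := List.length_drop
          have h2 : (c :: t).length = t.length + 1 := rfl
          omega), hdlen]
        apply List.map_congr_left
        intro i hi
        have hi0 : 0 ≤ i := by
          rcases (PySem.List.mem_pyRange_iff_of_pos hs i).1 hi with ⟨h1, _, _⟩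
          omega
        simp only [Function.comp]
        rw [PySem.List.slice_toNat _ (by omega) (by omega),
            PySem.List.slice_toNat _ (by omega) (by omega)]
        rw [List.drop_drop]
        congr 1
        · omega
        · congr 1; omega
      · -- fewer than s elements: both tails are empty
        have hdrop : (c :: t).drop s.toNat = [] := by
          apply List.drop_eq_nil_of_le; omega
        rw [hdrop]
        have h1 : PySem.List.pyRange 0 (((c :: t).length : Int) - s) s = [] := by
          rw [PySem.List.pyRange_of_pos _ _ hs, if_neg (by simp at hle ⊢; omega)]
          simp
        have h2 : pvChunks (s.toNat - 1) ([] : List Char) = [] := by rw [pvChunks]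
        rw [h1, h2]
        simp

theorem pvA_inner {s : Int} (k : Nat) :
    ∀ (t : List Char) (i : Int) (S : List (List Int)) (R : List Int),
      (∀ m : Nat, m < k → ¬ PySem.Int.mod (i + m) s = 0) →
      (PySem.List.enumerate t i).foldl (pvStepA s) (S, R)
      = (PySem.List.enumerate (t.drop k) (i + k)).foldl (pvStepA s)
          (S, R ++ (t.take k).map pvHexVal) := by
  induction k with
  | zero => intro t i S R _; simp
  | succ k ih =>
    intro t i S R h
    match t with
    | [] => simp [PySem.List.enumerate_nil]
    | c :: t' =>
      rw [PySem.List.enumerate_cons, List.foldl_cons]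
      have hmod : ¬ PySem.Int.mod (i + (0:Nat)) s = 0 := h 0 (by omega)
      simp only [Nat.cast_zero, add_zero] at hmod
      have hstep : pvStepA s (S, R) (i, c) = (S, R ++ [pvHexVal c]) := by
        simp [pvStepA, hmod]
      rw [hstep]
      rw [ih t' (i + 1) S (R ++ [pvHexVal c]) (by
        intro m hm
        have := h (m + 1) (by omega)
        push_cast at this ⊢
        convert this using 3
        ring)]
      simp only [List.drop_succ_cons, List.take_succ_cons, List.map_cons]
      rw [List.append_assoc]
      congr 2
      push_cast
      ring

theorem pvA_main {s : Int} (hs : 0 < s) (n : Nat) :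
    ∀ (t : List Char), t.length ≤ n → ∀ (q : Int), 0 ≤ q → ∀ (S : List (List Int)) (R : List Int),
      ((PySem.List.enumerate t (q * s)).foldl (pvStepA s) (S, R)).1
        ++ [((PySem.List.enumerate t (q * s)).foldl (pvStepA s) (S, R)).2]
      = (S ++ [R]) ++ (pvChunks (s.toNat - 1) t).map (List.map pvHexVal) := by
  induction n with
  | zero =>
    intro t ht q hq S R
    have : t = [] := List.eq_nil_of_length_eq_zero (by omega)
    subst this
    simp [PySem.List.enumerate_nil, pvChunks]
  | succ n ih =>
    intro t ht q hq S R
    match t with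
    | [] => simp [PySem.List.enumerate_nil, pvChunks]
    | c :: t' =>
      have hsN : 1 ≤ s.toNat := by omega
      rw [PySem.List.enumerate_cons, List.foldl_cons]
      have hmod : PySem.Int.mod (q * s) s = 0 := by
        rw [PySem.Int.mod_eq_emod_of_pos hs]
        exact Int.mul_emod_left q s
      have hstep : pvStepA s (S, R) (q * s, c) = (S ++ [R], [pvHexVal c]) := by
        simp [pvStepA, hmod]
      rw [hstep]
      rw [pvA_inner (s.toNat - 1) t' (q * s + 1) (S ++ [R]) [pvHexVal c] (by
        intro m hm
        rw [PySem.Int.mod_eq_emod_of_pos hs]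
        have h1 : q * s + 1 + (m:Int) = (1 + m) + s * q := by ring
        rw [h1, Int.add_mul_emod_self_left]
        have h2 : ((1:Int) + m) % s = 1 + m := Int.emod_eq_of_lt (by omega) (by omega)
        omega)]
      have hcast : (q * s + 1) + ((s.toNat - 1 : Nat) : Int) = (q + 1) * s := by
        have : ((s.toNat - 1 : Nat) : Int) = s - 1 := by omega
        rw [this]; ring
      rw [hcast]
      rw [ih (t'.drop (s.toNat - 1)) (by
          have h1 : (t'.drop (s.toNat - 1)).length = t'.length - (s.toNat - 1) := List.length_drop
          have h2 : (c :: t').length = t'.length + 1 := rfl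
          omega) (q + 1) (by omega)]
      conv_rhs => rw [pvChunks]
      rw [show s.toNat - 1 + 1 = s.toNat from by omega]
      simp only [List.map_cons, List.append_assoc]
      congr 1
      rw [show (c :: t').take s.toNat = c :: t'.take (s.toNat - 1) from by
        conv_lhs => rw [show s.toNat = (s.toNat - 1) + 1 from by omega]
        rw [List.take_succ_cons]]
      rw [show (c :: t').drop s.toNat = t'.drop (s.toNat - 1) from by
        conv_lhs => rw [show s.toNat = (s.toNat - 1) + 1 from by omega]
        rw [List.drop_succ_cons]]
      simp

-- ===== VERDICT (by name: the statement is the Claim_ definition above) =====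
theorem address_split_spec : Claim_equal_address_split := by
  intro address split_size _hdom hpre
  obtain ⟨hs | ⟨hneg, hempty⟩, -⟩ := hpre
  case inr =>
    -- split_size < 0 with empty hex: both programs return []
    unfold Spec_address_split address_split address_split_alt
    have hhex0 : PySem.Chars.lower (PySem.List.slice address.toList (some 2) none) = [] := by
      rw [PySem.List.slice_from _ (by norm_num : (0:Int) ≤ 2)]
      simp only [show ((2:Int)).toNat = 2 from rfl, hempty]
      rfl
    rw [hhex0]
    simp [PySem.List.enumerate_nil, PySem.List.pyRange, PySem.List.slice_from _ (by norm_num : (0:Int) ≤ 1)]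
  have hs' : (0 : Int) < split_size := by omega
  unfold Spec_address_split address_split address_split_alt
  set hex := PySem.Chars.lower (PySem.List.slice address.toList (some 2) none) with hhex
  have hmain := pvA_main hs' hex.length hex le_rfl 0 le_rfl [] []
  rw [zero_mul] at hmain
  have hB : (PySem.List.pyRange 0 (hex.length : Int) split_size).map
      (fun i => (PySem.List.slice hex (some i) (some (i + split_size))).map pvHexVal)
      = (pvChunks (split_size.toNat - 1) hex).map (List.map pvHexVal) := by
    rw [← pvB_chunks_aux hs' hex.length hex le_rfl, List.map_map]
    rfl
  rw [hB, PySem.List.slice_from _ (by norm_num : (0:Int) ≤ 1), hmain]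
  simp
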